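-- pv_equiv track=rewrite | github.com/ElRedid/Python-Preactica | practica_didactica/reto_34_numeros_perdidos.py | validador_array
-- ===== SOURCE A (Python) =====
-- def validador_array(array):
--     array_ordenado = array.copy(); array_ordenado.sort()
--     if array != array_ordenado:
--         return False
--     for i in range(len(array_ordenado)):
--         character_analizado = array_ordenado.pop()
--         if character_analizado in array_ordenado:
--             return False
--     return True
-- ===== SOURCE B (Python) =====
-- def validador_array(array):
--     return all(a < b for a, b in zip(array, array[1:]))
-- ===== Notes on version B (the rewrite author's own statement) =====
-- stated objective: faster
-- what changed: Replaces A's sort-then-compare plus quadratic pop/membership duplicate scan with a single linear pass over adjacent pairs checking strict ascending order.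
import Mathlib
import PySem

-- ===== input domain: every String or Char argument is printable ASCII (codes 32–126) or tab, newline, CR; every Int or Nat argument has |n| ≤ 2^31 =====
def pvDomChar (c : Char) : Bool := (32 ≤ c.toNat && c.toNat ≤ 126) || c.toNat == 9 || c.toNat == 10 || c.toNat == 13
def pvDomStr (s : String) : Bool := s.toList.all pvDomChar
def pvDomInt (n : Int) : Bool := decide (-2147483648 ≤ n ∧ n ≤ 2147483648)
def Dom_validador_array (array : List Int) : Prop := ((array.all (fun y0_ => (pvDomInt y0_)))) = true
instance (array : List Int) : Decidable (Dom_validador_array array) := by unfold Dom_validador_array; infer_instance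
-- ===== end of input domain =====

-- B replaces A's sort + quadratic pop/membership duplicate scan with one linear pass over
-- adjacent pairs checking strict ascending order (objective: faster).

-- ===== PORT A =====
-- the for-loop over range(len(array_ordenado)): pop the last element, return False if it is
-- still a member of the remainder; the 'none' branch of pop? (IndexError on empty) is
-- unreachable since the loop runs exactly length-many times.
def pvALoop : List Int → Nat → Bool
  | _, 0 => true
  | xs, Nat.succ n =>
    match PySem.List.pop? xs with
    | none => true
    | some (v, rest) => if rest.contains v then false else pvALoop rest n

def validador_array (array : List Int) : Bool :=
  let array_ordenado := PySem.List.sorted array (fun x => x) false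
  if array ≠ array_ordenado then false
  else pvALoop array_ordenado array_ordenado.length

-- ===== PORT B =====
-- all(a < b for a, b in zip(array, array[1:]))
def validador_array_alt (array : List Int) : Bool :=
  (array.zip (array.drop 1)).all (fun p => decide (p.1 < p.2))

-- ===== PRECONDITION & SPEC =====
def Spec_validador_array (array : List Int) (out : Bool) : Prop := out = validador_array_alt array
instance (array : List Int) (out : Bool) : Decidable (Spec_validador_array array out) := by unfold Spec_validador_array; infer_instance

-- ===== CLAIM (what is proved, stated in full; the proofs are below) =====
def Claim_equal_validador_array : Prop := ∀ (array : List Int), Dom_validador_array array → Spec_validador_array array (validador_array array)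

-- ===== LEMMAS AND PROOFS =====

-- A's pop/membership loop, run length-many times, is exactly a Nodup check.
theorem pvALoop_eq_nodup (xs : List Int) :
    pvALoop xs xs.length = decide xs.Nodup := by
  induction xs using List.reverseRecOn with
  | nil => simp [pvALoop]
  | append_singleton ys x ih =>
      have hlen : (ys ++ [x]).length = ys.length + 1 := by simp
      rw [hlen]
      simp only [pvALoop, PySem.List.pop?_last]
      by_cases hm : x ∈ ys
      · rw [if_pos (by simpa using hm)]
        simp [List.nodup_append, hm]
      · rw [if_neg (by simpa using hm), ih, decide_eq_decide]
        simp only [List.nodup_append, List.nodup_cons, List.not_mem_nil,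
          not_false_iff, List.nodup_nil, and_true]
        constructor
        · intro hnd
          refine ⟨hnd, trivial, fun a ha b hb => ?_⟩
          simp only [List.mem_singleton] at hb
          subst hb
          exact fun e => hm (e ▸ ha)
        · exact fun h => h.1

-- B is the adjacent-pairs (Chain') strictness check.
theorem alt_eq_chain' (l : List Int) :
    validador_array_alt l = decide (l.IsChain (· < ·)) := by
  induction l with
  | nil => rfl
  | cons a t ih =>
      cases t with
      | nil => rfl
      | cons b t' =>
          simp only [validador_array_alt, List.drop_one, List.tail_cons,
            List.zip_cons_cons, List.all_cons, List.isChain_cons_cons] at *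
          rw [ih]
          by_cases hab : a < b <;> simp [hab]

theorem a_true_iff (l : List Int) :
    validador_array l = true ↔ l.Pairwise (· < ·) := by
  constructor
  · intro h
    simp only [validador_array] at h
    split_ifs at h with hne
    replace hne : l = PySem.List.sorted l (fun x => x) := not_not.mp hne
    have hloop : pvALoop l l.length = true := by
      have hlen : (PySem.List.sorted l (fun x => x)).length = l.length :=
        (PySem.List.sorted_perm l (fun x => x) false).length_eq
      rw [hlen, ← hne] at h
      exact h
    have hnd : l.Nodup := by simpa [pvALoop_eq_nodup] using hloop
    have hle : l.Pairwise (fun a b => a ≤ b) := by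
      have h2 := PySem.List.sorted_pairwise (xs := l) (key := fun x => x)
      rwa [← hne] at h2
    exact (hle.and hnd).imp (fun hab => lt_of_le_of_ne hab.1 hab.2)
  · intro hp
    have hle : l.Pairwise (fun a b => (fun x => x) a ≤ (fun x => x) b) :=
      hp.imp (fun h => le_of_lt h)
    have hs : PySem.List.sorted l (fun x => x) = l :=
      PySem.List.sorted_eq_self_of_pairwise l (fun x => x) hle
    have hnd : l.Nodup := hp.imp (fun h => ne_of_lt h)
    simp only [validador_array, hs, ne_eq, not_true_eq_false, if_false,
      pvALoop_eq_nodup, hnd, decide_true]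

-- ===== VERDICT (by name: the statement is the Claim_ definition above) =====
theorem validador_array_spec : Claim_equal_validador_array := by
  intro array _
  unfold Spec_validador_array
  rw [Bool.eq_iff_iff, a_true_iff, alt_eq_chain',
    decide_eq_true_iff, List.isChain_iff_pairwise]
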